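-- pv_equiv track=rewrite | github.com/Siyuan23333/cse447-project | src/predict.py | get_char_predictions
-- ===== SOURCE A (Python) =====
-- def get_char_predictions(decoded_results, num_return_sequences=3):
--     char_predictions = []
--     for i in range(len(decoded_results) // num_return_sequences):
--         char_prediction = ""
--         for j in range(num_return_sequences):
--             pred = decoded_results[i * num_return_sequences + j]
--             if pred == "":
--                 char_prediction += " "
--             else:
--                 char_prediction += pred[0] if pred[0] != "\n" else " "
--         char_predictions.append(char_prediction)
--     return char_predictions
-- ===== SOURCE B (Python) =====
-- def get_char_predictions(decoded_results, num_return_sequences=3):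
--     preds = []
--     buf = []
--     for s in decoded_results:
--         c = s[0] if s else " "
--         buf.append(" " if c == "\n" else c)
--         if len(buf) == num_return_sequences:
--             preds.append("".join(buf))
--             buf = []
--     return preds
-- ===== Notes on version B (the rewrite author's own statement) =====
-- stated objective: alternative
-- what changed: Replaces A's division-and-index nested loops by a single streaming pass with a chunk buffer: each string's first character (blank for empty or newline-leading) is appended to a buffer that is flushed into the output whenever it reaches num_return_sequences, so no division or index arithmetic is used and the trailing partial buffer is naturally discarded.
import Mathlib
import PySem

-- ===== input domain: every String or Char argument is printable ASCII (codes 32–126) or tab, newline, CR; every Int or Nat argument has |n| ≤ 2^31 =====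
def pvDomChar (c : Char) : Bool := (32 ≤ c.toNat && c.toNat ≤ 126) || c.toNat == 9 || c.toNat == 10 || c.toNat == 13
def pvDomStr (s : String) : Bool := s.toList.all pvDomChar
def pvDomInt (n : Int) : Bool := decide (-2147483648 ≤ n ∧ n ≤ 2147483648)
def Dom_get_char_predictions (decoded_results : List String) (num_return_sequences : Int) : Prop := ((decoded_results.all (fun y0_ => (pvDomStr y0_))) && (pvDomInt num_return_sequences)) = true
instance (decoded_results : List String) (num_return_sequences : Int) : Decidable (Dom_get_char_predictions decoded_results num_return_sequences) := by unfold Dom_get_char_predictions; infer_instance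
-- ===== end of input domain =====

-- B replaces A's division/index nested loops by one streaming pass with a chunk buffer flushed at size num_return_sequences (objective: alternative).


-- ===== PORT A =====
def get_char_predictions (decoded_results : List String) (num_return_sequences : Int) : List String :=
  (PySem.List.pyRange 0 (PySem.Int.floordiv (decoded_results.length : Int) num_return_sequences) 1).foldl
    (fun char_predictions i =>
      let char_prediction : List Char :=
        (PySem.List.pyRange 0 num_return_sequences 1).foldl
          (fun cp j =>
            let pred := (PySem.List.pyGetD decoded_results (i * num_return_sequences + j) "").toList
            match pred with
            | [] => cp ++ [' ']
            | c :: _ => if c != '\n' then cp ++ [c] else cp ++ [' '])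
          []
      char_predictions ++ [String.ofList char_prediction])
    []

-- ===== PORT B =====
-- streaming pass: append each string's first char (blank for empty / newline-leading) to a buffer,
-- flush the buffer into the output when its length reaches num_return_sequences
def get_char_predictions_alt (decoded_results : List String) (num_return_sequences : Int) : List String :=
  (decoded_results.foldl
    (fun (st : List String × List Char) s =>
      let c : Char := match s.toList with | [] => ' ' | c :: _ => c
      let buf := st.2 ++ [if c == '\n' then ' ' else c]
      if (buf.length : Int) == num_return_sequences then (st.1 ++ [String.ofList buf], [])
      else (st.1, buf))
    ([], [])).1

-- ===== PRECONDITION & SPEC =====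
-- Pre_ excludes only num_return_sequences = 0, where Python A raises ZeroDivisionError (B returns []).
def Pre_get_char_predictions (decoded_results : List String) (num_return_sequences : Int) : Prop :=
  num_return_sequences ≠ 0
instance (decoded_results : List String) (num_return_sequences : Int) : Decidable (Pre_get_char_predictions decoded_results num_return_sequences) := by unfold Pre_get_char_predictions; infer_instance
def pvWitness_get_char_predictions : List String × Int := (["ab", "", "\nx"], 3)

def Spec_get_char_predictions (decoded_results : List String) (num_return_sequences : Int) (out : List String) : Prop := out = get_char_predictions_alt decoded_results num_return_sequences
instance (decoded_results : List String) (num_return_sequences : Int) (out : List String) : Decidable (Spec_get_char_predictions decoded_results num_return_sequences out) := by unfold Spec_get_char_predictions; infer_instance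

-- ===== CLAIM (what is proved, stated in full; the proofs are below) =====
def Claim_equal_get_char_predictions : Prop := ∀ (decoded_results : List String) (num_return_sequences : Int), Dom_get_char_predictions decoded_results num_return_sequences → Pre_get_char_predictions decoded_results num_return_sequences → Spec_get_char_predictions decoded_results num_return_sequences (get_char_predictions decoded_results num_return_sequences)


-- ===== LEMMAS AND PROOFS =====

-- the character B extracts from one string (blank for empty or newline-leading)
def pvFC (s : String) : Char :=
  match s.toList with
  | [] => ' '
  | c :: _ => if c == '\n' then ' ' else c

-- B's loop body, named for the proofs
def pvBodyB (n : Int) (st : List String × List Char) (s : String) : List String × List Char :=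
  if ((st.2 ++ [pvFC s]).length : Int) == n then (st.1 ++ [String.ofList (st.2 ++ [pvFC s])], [])
  else (st.1, st.2 ++ [pvFC s])

-- B's step on a pre-extracted character, with a Nat chunk size
def pvStep (m : Nat) (st : List String × List Char) (c : Char) : List String × List Char :=
  if (st.2 ++ [c]).length = m then (st.1 ++ [String.ofList (st.2 ++ [c])], [])
  else (st.1, st.2 ++ [c])

-- the specification shape both sides meet: full chunks of size m, remainder dropped
def pvChunks (m : Nat) (cs : List Char) : List String :=
  if h : 0 < m ∧ m ≤ cs.length then
    String.ofList (cs.take m) :: pvChunks m (cs.drop m)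
  else []
termination_by cs.length
decreasing_by simp only [List.length_drop]; omega

lemma pvAlt_eq_foldl (dr : List String) (n : Int) :
    get_char_predictions_alt dr n = (dr.foldl (pvBodyB n) ([], [])).1 := by
  unfold get_char_predictions_alt
  have hf : (fun (st : List String × List Char) s =>
      let c : Char := match s.toList with | [] => ' ' | c :: _ => c
      let buf := st.2 ++ [if c == '\n' then ' ' else c]
      if (buf.length : Int) == n then (st.1 ++ [String.ofList buf], ([] : List Char))
      else (st.1, buf)) = pvBodyB n := by
    funext st s
    unfold pvBodyB pvFC
    cases h : s.toList with
    | nil => simp [h]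
    | cons c t => simp [h]
  rw [hf]

lemma pvBodyB_eq_step (m : Nat) :
    pvBodyB (m : Int) = fun st s => pvStep m st (pvFC s) := by
  funext st s
  unfold pvBodyB pvStep
  by_cases h : (st.2 ++ [pvFC s]).length = m
  · rw [if_pos (by simp [h]), if_pos (by simp [h])]
  · rw [if_neg (by simp at h ⊢; omega), if_neg (by simp at h ⊢; omega)]

-- with a negative chunk size the flush condition never fires
lemma pvNoFlush (n : Int) (hn : n < 0) :
    ∀ (l : List String) (buf : List Char) (acc : List String),
      (l.foldl (pvBodyB n) (acc, buf)).1 = acc := by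
  intro l
  induction l with
  | nil => intro buf acc; rfl
  | cons s t ih =>
    intro buf acc
    rw [List.foldl_cons]
    unfold pvBodyB
    rw [if_neg (by simp; omega)]
    exact ih _ _

-- floor division of a nonnegative dividend by a negative divisor is ≤ 0
lemma pvFloordiv_nonpos (a b : Int) (ha : 0 ≤ a) (hb : b < 0) :
    PySem.Int.floordiv a b ≤ 0 := by
  by_contra h
  have h' : 0 < PySem.Int.floordiv a b := by omega
  have hmul := PySem.Int.floordiv_mul_add_mod a b
  have hmod := (PySem.Int.mod_neg_bounds a hb).2
  nlinarith

-- processing fewer characters than needed for a flush just extends the buffer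
lemma pvShort (m : Nat) :
    ∀ (cs : List Char) (acc : List String) (buf : List Char),
      buf.length + cs.length < m →
      cs.foldl (pvStep m) (acc, buf) = (acc, buf ++ cs) := by
  intro cs
  induction cs with
  | nil => intro acc buf _; simp
  | cons c t ih =>
    intro acc buf h
    have hstep : pvStep m (acc, buf) c = (acc, buf ++ [c]) := by
      unfold pvStep
      rw [if_neg (by simp at h ⊢; omega)]
    rw [List.foldl_cons, hstep, ih acc (buf ++ [c]) (by simp at h ⊢; omega)]
    simp

-- processing exactly the characters completing a chunk flushes it
lemma pvFill (m : Nat) :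
    ∀ (cs : List Char) (acc : List String) (buf : List Char),
      buf.length < m → buf.length + cs.length = m →
      cs.foldl (pvStep m) (acc, buf) = (acc ++ [String.ofList (buf ++ cs)], []) := by
  intro cs
  induction cs with
  | nil => intro acc buf h1 h2; simp at h2; omega
  | cons c t ih =>
    intro acc buf h1 h2
    by_cases h : (buf ++ [c]).length = m
    · have ht : t = [] := by
        have : t.length = 0 := by simp at h h2; omega
        exact List.eq_nil_of_length_eq_zero this
      subst ht
      have hstep : pvStep m (acc, buf) c = (acc ++ [String.ofList (buf ++ [c])], []) := by
        unfold pvStep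
        rw [if_pos h]
      rw [List.foldl_cons, hstep, List.foldl_nil]
    · have hstep : pvStep m (acc, buf) c = (acc, buf ++ [c]) := by
        unfold pvStep
        rw [if_neg h]
      rw [List.foldl_cons, hstep,
        ih acc (buf ++ [c]) (by simp at h ⊢; omega) (by simp at h2 ⊢; omega)]
      simp
-- B's fold from an empty buffer produces exactly the full chunks
lemma pvMainAux (m : Nat) (hm : 0 < m) :
    ∀ (k : Nat) (cs : List Char) (acc : List String), cs.length ≤ k →
      (cs.foldl (pvStep m) (acc, [])).1 = acc ++ pvChunks m cs := by
  intro k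
  induction k with
  | zero =>
    intro cs acc h
    have : cs = [] := List.eq_nil_of_length_eq_zero (by omega)
    subst this
    rw [pvChunks]
    rw [dif_neg (by simp; omega)]
    simp
  | succ k ih =>
    intro cs acc h
    by_cases hlen : m ≤ cs.length
    · have hfold : cs.foldl (pvStep m) (acc, ([] : List Char)) =
          (cs.drop m).foldl (pvStep m) ((cs.take m).foldl (pvStep m) (acc, [])) := by
        conv_lhs => rw [← List.take_append_drop m cs]
        rw [List.foldl_append]
      rw [hfold,
        pvFill m (cs.take m) acc [] (by simpa using hm)
          (by simp [List.length_take]; omega),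
        ih (cs.drop m) _ (by simp [List.length_drop]; omega)]
      conv_rhs => rw [pvChunks]
      rw [dif_pos ⟨hm, hlen⟩]
      simp
    · rw [pvShort m cs acc [] (by simp; omega)]
      rw [pvChunks, dif_neg (by omega)]
      simp

-- the per-index character A accumulates
def pvCharAt (decoded_results : List String) (idx : Int) : Char :=
  match (PySem.List.pyGetD decoded_results idx "").toList with
  | [] => ' '
  | c :: _ => if c != '\n' then c else ' '

lemma pvBody_eq (dr : List String) (base : Int) :
    (fun (cp : List Char) (j : Int) =>
      match (PySem.List.pyGetD dr (base + j) "").toList with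
      | [] => cp ++ [' ']
      | c :: _ => if c != '\n' then cp ++ [c] else cp ++ [' ']) =
    (fun cp j => cp ++ [pvCharAt dr (base + j)]) := by
  funext cp j
  unfold pvCharAt
  cases (PySem.List.pyGetD dr (base + j) "").toList with
  | nil => rfl
  | cons c t => by_cases h : c = '\n' <;> simp [h]

lemma pvCharAt_eq_fc (dr : List String) (k : Nat) (hk : k < dr.length) :
    pvCharAt dr (k : Int) = pvFC dr[k] := by
  unfold pvCharAt pvFC
  rw [PySem.List.pyGetD_natCast, List.getD_eq_getElem dr "" hk]
  cases (dr[k]).toList with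
  | nil => rfl
  | cons c t => by_cases h : c = '\n' <;> simp [h]

-- one group of A is one m-sized window of the first-char list
lemma pvGroup (dr : List String) (m iN : Nat) (hm : 0 < m)
    (hb : (iN + 1) * m ≤ dr.length) :
    (PySem.List.pyRange 0 (m : Int) 1).map (fun j => pvCharAt dr ((iN : Int) * (m : Int) + j)) =
    ((dr.map pvFC).drop (iN * m)).take m := by
  rw [PySem.List.pyRange_one, List.map_map]
  apply List.ext_getElem
  · simp only [List.length_map, List.length_range, List.length_take, List.length_drop,
      Int.toNat_natCast, sub_zero]
    have : iN * m + m ≤ dr.length := by nlinarith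
    omega
  · intro j h1 h2
    have hj : j < m := by simpa using h1
    have hidx : iN * m + j < dr.length := by nlinarith
    simp only [List.getElem_map, List.getElem_range, Function.comp_apply,
      List.getElem_take, List.getElem_drop, Int.toNat_natCast, sub_zero]
    rw [show (iN : Int) * (m : Int) + (0 + (j : Int)) = ((iN * m + j : Nat) : Int) by push_cast; ring,
        pvCharAt_eq_fc dr (iN * m + j) hidx]

-- the range-of-windows presentation equals the chunk recursion
lemma pvRangeChunks (m : Nat) (hm : 0 < m) :
    ∀ (k : Nat) (cs : List Char), cs.length ≤ k →
      (List.range (cs.length / m)).map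
        (fun i => String.ofList ((cs.drop (i * m)).take m)) = pvChunks m cs := by
  intro k
  induction k with
  | zero =>
    intro cs h
    have : cs = [] := List.eq_nil_of_length_eq_zero (by omega)
    subst this
    rw [pvChunks, dif_neg (by simp; omega)]
    simp
  | succ k ih =>
    intro cs h
    by_cases hlen : m ≤ cs.length
    · have hq : cs.length / m = (cs.drop m).length / m + 1 := by
        rw [List.length_drop]
        rw [Nat.div_eq_sub_div hm hlen]
      rw [hq, List.range_succ_eq_map, List.map_cons, List.map_map]
      conv_rhs => rw [pvChunks]
      rw [dif_pos ⟨hm, hlen⟩]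
      congr 1
      · simp
      · rw [← ih (cs.drop m) (by simp [List.length_drop]; omega)]
        apply List.map_congr_left
        intro i _
        simp only [Function.comp_apply]
        congr 2
        rw [List.drop_drop]
        congr 1
        rw [Nat.succ_mul]
        ring
    · have : cs.length / m = 0 := Nat.div_eq_of_lt (by omega)
      rw [this, pvChunks, dif_neg (by omega)]
      simp

-- A with a positive chunk size computes the chunk recursion
lemma pvA_chunks (dr : List String) (m : Nat) (hm : 0 < m) :
    get_char_predictions dr (m : Int) = pvChunks m (dr.map pvFC) := by
  unfold get_char_predictions
  rw [PySem.Int.floordiv_natCast]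
  simp only [pvBody_eq, PySem.List.foldl_append_singleton_eq_map, List.nil_append]
  rw [PySem.List.pyRange_one 0 (((dr.length / m : Nat)) : Int), List.map_map]
  rw [← pvRangeChunks m hm (dr.map pvFC).length (dr.map pvFC) le_rfl]
  simp only [List.length_map, Int.toNat_natCast, sub_zero]
  apply List.map_congr_left
  intro iN hiN
  rw [List.mem_range] at hiN
  simp only [Function.comp_apply, zero_add]
  have hb : (iN + 1) * m ≤ dr.length :=
    le_trans (Nat.mul_le_mul_right m hiN) (Nat.div_mul_le_self _ _)
  congr 1
  exact pvGroup dr m iN hm hb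

-- core equivalence on all nonzero chunk sizes
lemma pvCore (dr : List String) (n : Int) (hn : n ≠ 0) :
    get_char_predictions dr n = get_char_predictions_alt dr n := by
  rcases lt_or_gt_of_ne hn with hneg | hpos
  · have hk : PySem.Int.floordiv (dr.length : Int) n ≤ 0 :=
      pvFloordiv_nonpos _ _ (by positivity) hneg
    unfold get_char_predictions
    rw [PySem.List.pyRange_one_eq_nil hk, List.foldl_nil]
    rw [pvAlt_eq_foldl, pvNoFlush n hneg]
  · obtain ⟨m, rfl⟩ : ∃ m : Nat, n = (m : Int) := ⟨n.toNat, (Int.toNat_of_nonneg hpos.le).symm⟩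
    have hm : 0 < m := by exact_mod_cast hpos
    rw [pvA_chunks dr m hm, pvAlt_eq_foldl, pvBodyB_eq_step m, ← List.foldl_map]
    rw [pvMainAux m hm (dr.map pvFC).length (dr.map pvFC) [] le_rfl]
    simp

-- ===== VERDICT (by name: the statements are the Claim_ definitions above) =====
theorem get_char_predictions_spec : Claim_equal_get_char_predictions := by
  intro dr n _ hn
  unfold Spec_get_char_predictions
  exact pvCore dr n hn
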